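-- pv_equiv track=rewrite | github.com/MarcusAbenAthar/Bybit_Watcher | plugins/gerenciadores/gerenciador_plugins.py | _eh_grafo_aciclico
-- ===== SOURCE A (Python) =====
-- from typing import Optional, List, Dict, Set, Type
--
-- def _eh_grafo_aciclico(grafo: Dict[str, Set[str]]) -> bool:
--     """Verifica se um grafo é acíclico."""
--     visitados = set()
--     pilha = set()
--
--     def dfs(node):
--         visitados.add(node)
--         pilha.add(node)
--         for vizinho in grafo.get(node, set()):
--             if vizinho not in visitados:
--                 if not dfs(vizinho):
--                     return False
--             elif vizinho in pilha:
--                 return False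
--         pilha.remove(node)
--         return True
--
--     for node in grafo:
--         if node not in visitados:
--             if not dfs(node):
--                 return False
--     return True
-- ===== SOURCE B (Python) =====
-- def _eh_grafo_aciclico(grafo):
--     """Aciclico sse nenhum no e alcancavel a partir de seus proprios sucessores."""
--     for k in grafo:
--         reach = set(grafo[k])
--         for _ in range(len(grafo)):
--             for u in list(reach):
--                 for v in grafo.get(u, ()):
--                     reach.add(v)
--         if k in reach:
--             return False
--     return True
-- ===== Notes on version B (the rewrite author's own statement) =====
-- stated objective: alternative
-- what changed: Replaced the recursive three-colour DFS with a definition-style check: for each key, compute the set of nodes reachable from its successors by bounded fixpoint iteration and report a cycle iff the key is in its own reachable set.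
import Mathlib
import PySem

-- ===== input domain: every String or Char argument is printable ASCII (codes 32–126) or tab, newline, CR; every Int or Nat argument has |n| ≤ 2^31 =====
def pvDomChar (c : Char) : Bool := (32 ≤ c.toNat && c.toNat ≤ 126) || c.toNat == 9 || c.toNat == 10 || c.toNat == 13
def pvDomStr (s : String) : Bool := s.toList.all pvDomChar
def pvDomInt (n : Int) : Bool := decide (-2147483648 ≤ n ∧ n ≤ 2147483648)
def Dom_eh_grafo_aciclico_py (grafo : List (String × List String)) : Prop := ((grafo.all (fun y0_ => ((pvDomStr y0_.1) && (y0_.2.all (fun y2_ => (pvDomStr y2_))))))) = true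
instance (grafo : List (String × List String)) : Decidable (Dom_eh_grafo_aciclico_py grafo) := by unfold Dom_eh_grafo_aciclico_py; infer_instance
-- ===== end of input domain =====

-- B replaces the recursive three-colour DFS by a per-key reachability check (bounded
-- fixpoint iteration): the graph is acyclic iff no key is reachable from its own successors.

-- ===== PORT A =====
-- grafo.get(node, set()) — neighbour list of a node, empty if absent
def pvSucc (g : PySem.Dict String (List String)) (u : String) : List String :=
  PySem.Dict.getD g u []

mutual
-- the recursive dfs(node); state = (visitados, pilha, return value); fuel only makes the
-- recursion structural — it is strictly larger than the number of distinct nodes, so it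
-- never runs out on the call from eh_grafo_aciclico_py (proved in the lemmas below)
def pvDfsA (g : PySem.Dict String (List String)) : Nat → String → PySem.Set String → PySem.Set String → PySem.Set String × PySem.Set String × Bool
  | 0, _, V, P => (V, P, true)
  | f+1, node, V, P =>
    let r := pvDfsLoop g f node (pvSucc g node) (PySem.Set.add V node) (PySem.Set.add P node)
    -- pilha.remove(node): node is always in pilha here, so discard is exact
    if r.2.2 then (r.1, PySem.Set.discard r.2.1 node, true) else r
  termination_by f _ _ _ => (f, 0, 0)
-- the 'for vizinho in …' loop with its early returns
def pvDfsLoop (g : PySem.Dict String (List String)) : Nat → String → List String → PySem.Set String → PySem.Set String → PySem.Set String × PySem.Set String × Bool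
  | _, _, [], V, P => (V, P, true)
  | f, node, viz :: rest, V, P =>
    if PySem.Set.contains V viz = false then
      let r := pvDfsA g f viz V P
      if r.2.2 = false then r else pvDfsLoop g f node rest r.1 r.2.1
    else if PySem.Set.contains P viz then (V, P, false)
    else pvDfsLoop g f node rest V P
  termination_by f _ l _ _ => (f, 1, l.length)
end

-- the 'for node in grafo' loop
def pvOuterA (g : PySem.Dict String (List String)) (fuel : Nat) : List String → PySem.Set String → PySem.Set String → Bool
  | [], _, _ => true
  | node :: rest, V, P =>
    if PySem.Set.contains V node = false then
      let r := pvDfsA g fuel node V P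
      if r.2.2 = false then false else pvOuterA g fuel rest r.1 r.2.1
    else pvOuterA g fuel rest V P

def eh_grafo_aciclico_py (grafo : List (String × List String)) : Bool :=
  let g := PySem.Dict.ofList grafo
  pvOuterA g (grafo.length + (grafo.map (fun p => p.2.length)).sum + 1) (PySem.Dict.keys g) [] []

-- ===== PORT B =====
-- 'for u in list(reach): for v in grafo.get(u, ()): reach.add(v)'
def pvStepB (g : PySem.Dict String (List String)) (r : PySem.Set String) : PySem.Set String :=
  List.foldl (fun acc u => PySem.Set.update acc (pvSucc g u)) r r

-- 'for _ in range(n): …'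
def pvCloseB (g : PySem.Dict String (List String)) : Nat → PySem.Set String → PySem.Set String
  | 0, r => r
  | n+1, r => pvCloseB g n (pvStepB g r)

-- 'for k in grafo: … if k in reach: return False'
def pvKeysLoopB (g : PySem.Dict String (List String)) : List String → Bool
  | [] => true
  | k :: rest =>
    if PySem.Set.contains (pvCloseB g (PySem.Dict.keys g).length (PySem.Set.ofList (pvSucc g k))) k then false
    else pvKeysLoopB g rest

def eh_grafo_aciclico_py_alt (grafo : List (String × List String)) : Bool :=
  pvKeysLoopB (PySem.Dict.ofList grafo) (PySem.Dict.keys (PySem.Dict.ofList grafo))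

-- ===== PRECONDITION & SPEC =====
def Spec_eh_grafo_aciclico_py (grafo : List (String × List String)) (out : Bool) : Prop := out = eh_grafo_aciclico_py_alt grafo
instance (grafo : List (String × List String)) (out : Bool) : Decidable (Spec_eh_grafo_aciclico_py grafo out) := by unfold Spec_eh_grafo_aciclico_py; infer_instance

-- ===== CLAIM (what is proved, stated in full; the proofs are below) =====
def Claim_equal_eh_grafo_aciclico_py : Prop := ∀ (grafo : List (String × List String)), Dom_eh_grafo_aciclico_py grafo → Spec_eh_grafo_aciclico_py grafo (eh_grafo_aciclico_py grafo)

-- ===== LEMMAS AND PROOFS =====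

-- the edge relation of the graph, and "the graph has a directed cycle"
def EdgeG (g : PySem.Dict String (List String)) (u v : String) : Prop := v ∈ PySem.Dict.getD g u []
def CycG (g : PySem.Dict String (List String)) : Prop := ∃ u, Relation.TransGen (EdgeG g) u u

-- DFS invariant: finished ("black") nodes have black successors and lie on no cycle
def BlackInv (g : PySem.Dict String (List String)) (V P : List String) : Prop :=
  ∀ u, u ∈ V → u ∉ P → (∀ v, EdgeG g u v → v ∈ V ∧ v ∉ P) ∧ ¬ Relation.TransGen (EdgeG g) u u

-- number of universe nodes not yet visited (the DFS termination measure)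
def pvM (U V : List String) : Nat := (U.filter (fun x => !PySem.Set.contains V x)).length

lemma edge_src_key (g : PySem.Dict String (List String)) (u v : String) (h : EdgeG g u v) :
    u ∈ PySem.Dict.keys g := by
  unfold EdgeG at h
  rw [PySem.Dict.getD_eq_get?_getD] at h
  rw [← PySem.Dict.contains_iff_mem_keys, PySem.Dict.contains_eq_isSome_get?]
  cases hg : PySem.Dict.get? g u with
  | none => rw [hg] at h; simp at h
  | some L => simp [hg]

lemma get?_ofList_mem (l : List (String × List String)) (k : String) (v : List String)
    (h : (PySem.Dict.ofList l).get? k = some v) : (k, v) ∈ l := by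
  have aux : ∀ (l : List (String × List String)) (d : PySem.Dict String (List String)) k v,
      (List.foldl (fun d p => d.insert p.1 p.2) d l).get? k = some v → (k, v) ∈ l ∨ d.get? k = some v := by
    intro l
    induction l with
    | nil => intro d k v h; exact Or.inr h
    | cons p rest ih =>
      intro d k v h
      rcases ih _ _ _ h with h1 | h1
      · exact Or.inl (List.mem_cons_of_mem _ h1)
      · rw [PySem.Dict.get?_insert] at h1
        by_cases hk : k = p.1
        · subst hk
          simp at h1
          exact Or.inl (by simp [← h1])
        · rw [if_neg hk] at h1; exact Or.inr h1
  have h' : (List.foldl (fun d p => d.insert p.1 p.2) PySem.Dict.empty l).get? k = some v := h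
  rcases aux l PySem.Dict.empty k v h' with h1 | h1
  · exact h1
  · rw [PySem.Dict.get?_empty] at h1; exact absurd h1 (by simp)

lemma m_mono (U V V' : List String) (h : ∀ x ∈ V, x ∈ V') : pvM U V' ≤ pvM U V := by
  unfold pvM
  rw [← List.countP_eq_length_filter, ← List.countP_eq_length_filter]
  apply List.countP_mono_left
  intro x _ hx
  simp only [Bool.not_eq_eq_eq_not, Bool.not_true] at hx ⊢
  by_contra hc
  have hVx : PySem.Set.contains V x = true := by
    cases hcc : PySem.Set.contains V x
    · exact absurd hcc hc
    · rfl
  have hm : x ∈ V' := h x ((PySem.Set.contains_iff V x).1 hVx)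
  rw [(PySem.Set.contains_iff V' x).2 hm] at hx
  simp at hx

lemma countP_lt (p q : String → Bool) (l : List String) (hpq : ∀ x ∈ l, p x = true → q x = true)
    (a : String) (ha : a ∈ l) (hpa : p a = false) (hqa : q a = true) :
    l.countP p < l.countP q := by
  induction l with
  | nil => simp at ha
  | cons b l ih =>
    simp only [List.countP_cons]
    rcases List.mem_cons.1 ha with rfl | ha'
    · have hle := List.countP_mono_left (l := l) (fun x hx => hpq x (List.mem_cons_of_mem _ hx))
      simp [hpa, hqa]
      omega
    · have hlt := ih (fun x hx => hpq x (List.mem_cons_of_mem _ hx)) ha'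
      have himp := hpq b List.mem_cons_self
      by_cases hpb : p b = true
      · simp [hpb, himp hpb]; omega
      · simp only [Bool.not_eq_true] at hpb
        cases hqb : q b <;> simp [hpb, hqb] <;> omega

lemma m_strict (U V : List String) (node : String) (hU : node ∈ U) (hV : node ∉ V) :
    pvM U (PySem.Set.add V node) < pvM U V := by
  unfold pvM
  rw [← List.countP_eq_length_filter, ← List.countP_eq_length_filter]
  have hpt : ∀ x ∈ U, (!PySem.Set.contains (PySem.Set.add V node) x) = true →
      (!PySem.Set.contains V x) = true := by
    intro x _ hx
    simp only [Bool.not_eq_eq_eq_not, Bool.not_true] at hx ⊢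
    by_contra hc
    have hVx : PySem.Set.contains V x = true := by
      cases hcc : PySem.Set.contains V x
      · exact absurd hcc hc
      · rfl
    have h2 : x ∈ PySem.Set.add V node :=
      (PySem.Set.mem_add V node x).2 (Or.inl ((PySem.Set.contains_iff V x).1 hVx))
    rw [(PySem.Set.contains_iff _ x).2 h2] at hx
    simp at hx
  have hnode1 : (!PySem.Set.contains (PySem.Set.add V node) node) = false := by
    simp [(PySem.Set.contains_iff _ node).2 ((PySem.Set.mem_add V node node).2 (Or.inr rfl))]
  have hnode2 : (!PySem.Set.contains V node) = true := by
    cases hcc : PySem.Set.contains V node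
    · rfl
    · exact absurd ((PySem.Set.contains_iff V node).1 hcc) hV
  exact countP_lt _ _ U hpt node hU hnode1 hnode2

lemma discard_append_self (P : List String) (x : String) (h : x ∉ P) :
    PySem.Set.discard (P ++ [x]) x = P := by
  unfold PySem.Set.discard
  rw [List.filter_append]
  have h1 : List.filter (fun y => !y == x) P = P := by
    apply List.filter_eq_self.2
    intro a ha
    have hax : a ≠ x := fun he => h (he ▸ ha)
    simp [hax]
  have h2 : List.filter (fun y => !y == x) [x] = [] := by simp
  rw [h1, h2, List.append_nil]

-- ---- mono + pilha-restoration, by mutual fuel/list induction ----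

def ABasic (g : PySem.Dict String (List String)) (f : Nat) : Prop :=
  ∀ node V P, (∀ x ∈ P, x ∈ V) → node ∉ V →
    (∀ x ∈ V, x ∈ (pvDfsA g f node V P).1) ∧
    ((pvDfsA g f node V P).2.2 = true → (pvDfsA g f node V P).2.1 = P)

def LBasic (g : PySem.Dict String (List String)) (f : Nat) : Prop :=
  ∀ node l V P, (∀ x ∈ P, x ∈ V) →
    (∀ x ∈ V, x ∈ (pvDfsLoop g f node l V P).1) ∧
    ((pvDfsLoop g f node l V P).2.2 = true → (pvDfsLoop g f node l V P).2.1 = P)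

lemma l_basic (g : PySem.Dict String (List String)) (f : Nat) (hA : ABasic g f) : LBasic g f := by
  intro node l V P hPV
  induction l generalizing V P with
  | nil =>
    rw [pvDfsLoop]
    exact ⟨fun x hx => hx, fun _ => rfl⟩
  | cons viz rest ih =>
    rw [pvDfsLoop]
    by_cases hv : PySem.Set.contains V viz = false
    · rw [if_pos hv]
      have hviznV : viz ∉ V := fun hc => by
        rw [(PySem.Set.contains_iff V viz).2 hc] at hv; simp at hv
      have hArec := hA viz V P hPV hviznV
      cases hr : (pvDfsA g f viz V P).2.2 with
      | false =>
        simp only [hr]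
        exact ⟨hArec.1, fun hc => absurd (hr ▸ hc) (by simp)⟩
      | true =>
        have hP : (pvDfsA g f viz V P).2.1 = P := hArec.2 hr
        simp only [hr]
        rw [if_neg (by simp)]
        have hPV' : ∀ x ∈ (pvDfsA g f viz V P).2.1, x ∈ (pvDfsA g f viz V P).1 := by
          rw [hP]; intro x hx; exact hArec.1 x (hPV x hx)
        have hrec := ih (pvDfsA g f viz V P).1 (pvDfsA g f viz V P).2.1 hPV'
        refine ⟨fun x hx => hrec.1 x (hArec.1 x hx), fun ht => ?_⟩
        rw [hrec.2 ht, hP]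
    · rw [if_neg hv]
      by_cases hp : PySem.Set.contains P viz = true
      · rw [if_pos hp]
        exact ⟨fun x hx => hx, fun hc => absurd hc (by simp)⟩
      · rw [if_neg hp]
        exact ih V P hPV

lemma a_basic_zero (g : PySem.Dict String (List String)) : ABasic g 0 := by
  intro node V P hPV hnV
  rw [pvDfsA]
  exact ⟨fun x hx => hx, fun _ => rfl⟩

lemma a_basic_succ (g : PySem.Dict String (List String)) (f : Nat) (hL : LBasic g f) : ABasic g (f+1) := by
  intro node V P hPV hnV
  have hnP : node ∉ P := fun hc => hnV (hPV node hc)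
  have hP1V1 : ∀ x ∈ PySem.Set.add P node, x ∈ PySem.Set.add V node := by
    intro x hx
    rcases (PySem.Set.mem_add P node x).1 hx with h | h
    · exact (PySem.Set.mem_add V node x).2 (Or.inl (hPV x h))
    · exact (PySem.Set.mem_add V node x).2 (Or.inr h)
  have hLp := hL node (pvSucc g node) (PySem.Set.add V node) (PySem.Set.add P node) hP1V1
  rw [pvDfsA]
  cases hok : (pvDfsLoop g f node (pvSucc g node) (PySem.Set.add V node) (PySem.Set.add P node)).2.2 with
  | false =>
    simp only [hok, if_neg (by simp : ¬ (false = true))]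
    refine ⟨fun x hx => hLp.1 x ((PySem.Set.mem_add V node x).2 (Or.inl hx)), fun hc => absurd (hok ▸ hc) (by simp [hok])⟩
  | true =>
    refine ⟨fun x hx => hLp.1 x ((PySem.Set.mem_add V node x).2 (Or.inl hx)), fun _ => ?_⟩
    show PySem.Set.discard (pvDfsLoop g f node (pvSucc g node) (PySem.Set.add V node) (PySem.Set.add P node)).2.1 node = P
    rw [hLp.2 hok, PySem.Set.add_of_not_mem hnP, discard_append_self P node hnP]

lemma basic_all (g : PySem.Dict String (List String)) (f : Nat) : ABasic g f ∧ LBasic g f := by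
  induction f with
  | zero => exact ⟨a_basic_zero g, l_basic g 0 (a_basic_zero g)⟩
  | succ f ih => exact ⟨a_basic_succ g f ih.2, l_basic g (f+1) (a_basic_succ g f ih.2)⟩

-- ---- soundness: a false answer exhibits a cycle ----

def ASound (g : PySem.Dict String (List String)) (f : Nat) : Prop :=
  ∀ node V P, (∀ x ∈ P, x ∈ V) → node ∉ V →
    (∀ x ∈ P, Relation.ReflTransGen (EdgeG g) x node) →
    (pvDfsA g f node V P).2.2 = false → CycG g

def LSound (g : PySem.Dict String (List String)) (f : Nat) : Prop :=
  ∀ node l V P, (∀ x ∈ P, x ∈ V) → node ∈ P →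
    (∀ x ∈ P, Relation.ReflTransGen (EdgeG g) x node) →
    (∀ viz ∈ l, EdgeG g node viz) →
    (pvDfsLoop g f node l V P).2.2 = false → CycG g

lemma l_sound (g : PySem.Dict String (List String)) (f : Nat) (hA : ASound g f) : LSound g f := by
  intro node l V P hPV hnodeP hRT hEdges
  induction l generalizing V P with
  | nil => rw [pvDfsLoop]; intro h; simp at h
  | cons viz rest ih =>
    rw [pvDfsLoop]
    by_cases hv : PySem.Set.contains V viz = false
    · rw [if_pos hv]
      have hviznV : viz ∉ V := fun hc => by
        rw [(PySem.Set.contains_iff V viz).2 hc] at hv; simp at hv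
      have hRTviz : ∀ x ∈ P, Relation.ReflTransGen (EdgeG g) x viz :=
        fun x hx => (hRT x hx).tail (hEdges viz List.mem_cons_self)
      cases hr : (pvDfsA g f viz V P).2.2 with
      | false =>
        simp only [hr]
        intro _
        exact hA viz V P hPV hviznV hRTviz hr
      | true =>
        simp only [hr]
        rw [if_neg (by simp)]
        have hP : (pvDfsA g f viz V P).2.1 = P := ((basic_all g f).1 viz V P hPV hviznV).2 hr
        have hmono := ((basic_all g f).1 viz V P hPV hviznV).1
        rw [hP]
        exact ih (pvDfsA g f viz V P).1 P (fun x hx => hmono x (hPV x hx)) hnodeP hRT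
          (fun w hw => hEdges w (List.mem_cons_of_mem _ hw))
    · rw [if_neg hv]
      by_cases hp : PySem.Set.contains P viz = true
      · rw [if_pos hp]
        intro _
        exact ⟨viz, Relation.TransGen.tail' (hRT viz ((PySem.Set.contains_iff P viz).1 hp))
          (hEdges viz List.mem_cons_self)⟩
      · rw [if_neg hp]
        exact ih V P hPV hnodeP hRT (fun w hw => hEdges w (List.mem_cons_of_mem _ hw))

lemma a_sound_zero (g : PySem.Dict String (List String)) : ASound g 0 := by
  intro node V P _ _ _ h
  rw [pvDfsA] at h
  simp at h

lemma a_sound_succ (g : PySem.Dict String (List String)) (f : Nat) (hL : LSound g f) : ASound g (f+1) := by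
  intro node V P hPV hnV hRT
  have hnP : node ∉ P := fun hc => hnV (hPV node hc)
  have hP1V1 : ∀ x ∈ PySem.Set.add P node, x ∈ PySem.Set.add V node := by
    intro x hx
    rcases (PySem.Set.mem_add P node x).1 hx with h | h
    · exact (PySem.Set.mem_add V node x).2 (Or.inl (hPV x h))
    · exact (PySem.Set.mem_add V node x).2 (Or.inr h)
  rw [pvDfsA]
  cases hok : (pvDfsLoop g f node (pvSucc g node) (PySem.Set.add V node) (PySem.Set.add P node)).2.2 with
  | true => intro h; simp at h
  | false =>
    intro _
    refine hL node (pvSucc g node) (PySem.Set.add V node) (PySem.Set.add P node) hP1V1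
      ((PySem.Set.mem_add P node node).2 (Or.inr rfl)) ?_ (fun viz hv => hv) hok
    intro x hx
    rcases (PySem.Set.mem_add P node x).1 hx with h | h
    · exact (hRT x h)
    · exact h ▸ Relation.ReflTransGen.refl

lemma sound_all (g : PySem.Dict String (List String)) (f : Nat) : ASound g f ∧ LSound g f := by
  induction f with
  | zero => exact ⟨a_sound_zero g, l_sound g 0 (a_sound_zero g)⟩
  | succ f ih => exact ⟨a_sound_succ g f ih.2, l_sound g (f+1) (a_sound_succ g f ih.2)⟩

-- ---- completeness: a true answer maintains the black invariant ----

lemma black_rtg (g : PySem.Dict String (List String)) (V P : List String) (hInv : BlackInv g V P)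
    (u w : String) (h : Relation.ReflTransGen (EdgeG g) u w) (hu : u ∈ V) (hp : u ∉ P) :
    w ∈ V ∧ w ∉ P := by
  induction h with
  | refl => exact ⟨hu, hp⟩
  | tail hab hbc ih => exact (hInv _ ih.1 ih.2).1 _ hbc

lemma blackInv_push (g : PySem.Dict String (List String)) (V P : List String) (node : String)
    (hInv : BlackInv g V P) (hnV : node ∉ V) :
    BlackInv g (PySem.Set.add V node) (PySem.Set.add P node) := by
  intro u hu hup
  have hun : u ≠ node := by
    intro he; subst he
    exact hup ((PySem.Set.mem_add P u u).2 (Or.inr rfl))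
  have huV : u ∈ V := by
    rcases (PySem.Set.mem_add V node u).1 hu with h | h
    · exact h
    · exact absurd h hun
  have hup' : u ∉ P := fun hc => hup ((PySem.Set.mem_add P node u).2 (Or.inl hc))
  rcases hInv u huV hup' with ⟨he, hc⟩
  refine ⟨?_, hc⟩
  intro v hv
  rcases he v hv with ⟨hv1, hv2⟩
  refine ⟨(PySem.Set.mem_add V node v).2 (Or.inl hv1), ?_⟩
  intro hvc
  rcases (PySem.Set.mem_add P node v).1 hvc with h | h
  · exact hv2 h
  · exact hnV (h ▸ hv1)

def AComp (g : PySem.Dict String (List String)) (U : List String) (f : Nat) : Prop :=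
  ∀ node V P, (∀ x ∈ P, x ∈ V) → node ∉ V → node ∈ U → BlackInv g V P → pvM U V < f →
    (pvDfsA g f node V P).2.2 = true →
    node ∈ (pvDfsA g f node V P).1 ∧ BlackInv g (pvDfsA g f node V P).1 P

def LComp (g : PySem.Dict String (List String)) (U : List String) (f : Nat) : Prop :=
  ∀ node l V P, (∀ x ∈ P, x ∈ V) → (∀ viz ∈ l, viz ∈ U) → BlackInv g V P → pvM U V < f →
    (pvDfsLoop g f node l V P).2.2 = true →
    BlackInv g (pvDfsLoop g f node l V P).1 P ∧
    ∀ viz ∈ l, viz ∈ (pvDfsLoop g f node l V P).1 ∧ viz ∉ P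

lemma l_comp (g : PySem.Dict String (List String)) (U : List String) (f : Nat)
    (hA : AComp g U f) : LComp g U f := by
  intro node l V P hPV hlU hInv hm
  induction l generalizing V P with
  | nil =>
    rw [pvDfsLoop]
    exact fun _ => ⟨hInv, fun viz h => absurd h (by simp)⟩
  | cons viz rest ih =>
    rw [pvDfsLoop]
    by_cases hv : PySem.Set.contains V viz = false
    · rw [if_pos hv]
      have hviznV : viz ∉ V := fun hc => by
        rw [(PySem.Set.contains_iff V viz).2 hc] at hv; simp at hv
      have hviznP : viz ∉ P := fun hc => hviznV (hPV viz hc)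
      cases hr : (pvDfsA g f viz V P).2.2 with
      | false =>
        simp only [hr]
        intro h; simp [hr] at h
      | true =>
        simp only [hr]
        rw [if_neg (by simp)]
        have hbasic := (basic_all g f).1 viz V P hPV hviznV
        have hP : (pvDfsA g f viz V P).2.1 = P := hbasic.2 hr
        have hcomp := hA viz V P hPV hviznV (hlU viz List.mem_cons_self) hInv hm hr
        rw [hP]
        intro ht
        have hm' : pvM U (pvDfsA g f viz V P).1 < f := lt_of_le_of_lt (m_mono U V _ hbasic.1) hm
        have hrec := ih (pvDfsA g f viz V P).1 P (fun x hx => hbasic.1 x (hPV x hx))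
          (fun w hw => hlU w (List.mem_cons_of_mem _ hw)) hcomp.2 hm' ht
        refine ⟨hrec.1, ?_⟩
        intro w hw
        rcases List.mem_cons.1 hw with rfl | hw'
        · have hmonoL := ((basic_all g f).2 node rest (pvDfsA g f w V P).1 P
            (fun x hx => hbasic.1 x (hPV x hx))).1
          exact ⟨hmonoL w hcomp.1, hviznP⟩
        · exact hrec.2 w hw'
    · rw [if_neg hv]
      have hvizV : viz ∈ V := (PySem.Set.contains_iff V viz).1 (by
        cases hc : PySem.Set.contains V viz; exact absurd hc hv; rfl)
      by_cases hp : PySem.Set.contains P viz = true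
      · rw [if_pos hp]; intro h; simp at h
      · rw [if_neg hp]
        intro ht
        have hviznP : viz ∉ P := fun hc => hp ((PySem.Set.contains_iff P viz).2 hc)
        have hrec := ih V P hPV (fun w hw => hlU w (List.mem_cons_of_mem _ hw)) hInv hm ht
        refine ⟨hrec.1, ?_⟩
        intro w hw
        rcases List.mem_cons.1 hw with rfl | hw'
        · have hmonoL := ((basic_all g f).2 node rest V P hPV).1
          exact ⟨hmonoL w hvizV, hviznP⟩
        · exact hrec.2 w hw' 

lemma a_comp_zero (g : PySem.Dict String (List String)) (U : List String) : AComp g U 0 := by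
  intro node V P _ _ _ _ hm
  exact absurd hm (Nat.not_lt_zero _)

lemma a_comp_succ (g : PySem.Dict String (List String)) (U : List String)
    (hU1 : ∀ u v, EdgeG g u v → v ∈ U) (f : Nat) (hL : LComp g U f) : AComp g U (f+1) := by
  intro node V P hPV hnV hnU hInv hm
  have hnP : node ∉ P := fun hc => hnV (hPV node hc)
  have hP1V1 : ∀ x ∈ PySem.Set.add P node, x ∈ PySem.Set.add V node := by
    intro x hx
    rcases (PySem.Set.mem_add P node x).1 hx with h | h
    · exact (PySem.Set.mem_add V node x).2 (Or.inl (hPV x h))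
    · exact (PySem.Set.mem_add V node x).2 (Or.inr h)
  rw [pvDfsA]
  cases hok : (pvDfsLoop g f node (pvSucc g node) (PySem.Set.add V node) (PySem.Set.add P node)).2.2 with
  | false => intro h; rw [if_neg (by simp [hok])] at h; rw [hok] at h; simp at h
  | true =>
    intro _
    rw [if_pos rfl]
    have hm1 : pvM U (PySem.Set.add V node) < f :=
      lt_of_lt_of_le (m_strict U V node hnU hnV) (Nat.lt_succ_iff.1 hm)
    have hLp := hL node (pvSucc g node) (PySem.Set.add V node) (PySem.Set.add P node) hP1V1
      (fun viz hv => hU1 node viz hv) (blackInv_push g V P node hInv hnV) hm1 hok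
    have hmonoL := ((basic_all g f).2 node (pvSucc g node) (PySem.Set.add V node)
      (PySem.Set.add P node) hP1V1).1
    refine ⟨hmonoL node ((PySem.Set.mem_add V node node).2 (Or.inr rfl)), ?_⟩
    intro u hu hup
    by_cases hun : u = node
    · subst hun
      constructor
      · intro v hv
        rcases hLp.2 v hv with ⟨hv1, hv2⟩
        exact ⟨hv1, fun hc => hv2 ((PySem.Set.mem_add P u v).2 (Or.inl hc))⟩
      · intro htg
        rcases Relation.TransGen.head'_iff.1 htg with ⟨b, hb, hrtg⟩
        rcases hLp.2 b hb with ⟨hb1, hb2⟩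
        have := black_rtg g _ _ hLp.1 b u hrtg hb1 hb2
        exact this.2 ((PySem.Set.mem_add P u u).2 (Or.inr rfl))
    · have hup1 : u ∉ PySem.Set.add P node := by
        intro hc
        rcases (PySem.Set.mem_add P node u).1 hc with h | h
        · exact hup h
        · exact hun h
      rcases hLp.1 u hu hup1 with ⟨hedges, htg⟩
      refine ⟨?_, htg⟩
      intro v hv
      rcases hedges v hv with ⟨a, b⟩
      exact ⟨a, fun hc => b ((PySem.Set.mem_add P node v).2 (Or.inl hc))⟩

lemma comp_all (g : PySem.Dict String (List String)) (U : List String)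
    (hU1 : ∀ u v, EdgeG g u v → v ∈ U) (f : Nat) : AComp g U f ∧ LComp g U f := by
  induction f with
  | zero => exact ⟨a_comp_zero g U, l_comp g U 0 (a_comp_zero g U)⟩
  | succ f ih => exact ⟨a_comp_succ g U hU1 f ih.2, l_comp g U (f+1) (a_comp_succ g U hU1 f ih.2)⟩

-- ---- the outer loop ----

lemma outer_sound (g : PySem.Dict String (List String)) (fuel : Nat) :
    ∀ l V, pvOuterA g fuel l V [] = false → CycG g := by
  intro l
  induction l with
  | nil => intro V h; rw [pvOuterA] at h; simp at h
  | cons node rest ih =>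
    intro V h
    rw [pvOuterA] at h
    by_cases hv : PySem.Set.contains V node = false
    · rw [if_pos hv] at h
      have hnV : node ∉ V := fun hc => by
        rw [(PySem.Set.contains_iff V node).2 hc] at hv; simp at hv
      cases hr : (pvDfsA g fuel node V []).2.2 with
      | false =>
        exact (sound_all g fuel).1 node V [] (fun x hx => absurd hx (by simp)) hnV
          (fun x hx => absurd hx (by simp)) hr
      | true =>
        rw [if_neg (by simp [hr])] at h
        have hP : (pvDfsA g fuel node V []).2.1 = [] :=
          ((basic_all g fuel).1 node V [] (fun x hx => absurd hx (by simp)) hnV).2 hr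
        rw [hP] at h
        exact ih _ h
    · rw [if_neg hv] at h
      exact ih V h

lemma outer_complete (g : PySem.Dict String (List String)) (U : List String)
    (hU1 : ∀ u v, EdgeG g u v → v ∈ U) (fuel : Nat) :
    ∀ l V, (∀ k ∈ l, k ∈ U) → BlackInv g V [] → pvM U V < fuel →
    pvOuterA g fuel l V [] = true → ∀ k ∈ l, ¬ Relation.TransGen (EdgeG g) k k := by
  intro l
  induction l with
  | nil => intro V _ _ _ _ k hk; exact absurd hk (by simp)
  | cons node rest ih =>
    intro V hlU hInv hm h
    rw [pvOuterA] at h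
    by_cases hv : PySem.Set.contains V node = false
    · rw [if_pos hv] at h
      have hnV : node ∉ V := fun hc => by
        rw [(PySem.Set.contains_iff V node).2 hc] at hv; simp at hv
      cases hr : (pvDfsA g fuel node V []).2.2 with
      | false => rw [if_pos (by simp [hr])] at h; simp at h
      | true =>
        rw [if_neg (by simp [hr])] at h
        have hcomp := (comp_all g U hU1 fuel).1 node V [] (fun x hx => absurd hx (by simp)) hnV
          (hlU node List.mem_cons_self) hInv hm hr
        have hP : (pvDfsA g fuel node V []).2.1 = [] :=
          ((basic_all g fuel).1 node V [] (fun x hx => absurd hx (by simp)) hnV).2 hr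
        rw [hP] at h
        have hmono := ((basic_all g fuel).1 node V [] (fun x hx => absurd hx (by simp)) hnV).1
        have hrec := ih (pvDfsA g fuel node V []).1 (fun w hw => hlU w (List.mem_cons_of_mem _ hw))
          hcomp.2 (lt_of_le_of_lt (m_mono U V _ hmono) hm) h
        intro k hk
        rcases List.mem_cons.1 hk with rfl | hk'
        · exact (hcomp.2 k hcomp.1 (by simp)).2
        · exact hrec k hk'
    · rw [if_neg hv] at h
      have hvV : node ∈ V := (PySem.Set.contains_iff V node).1 (by
        cases hc : PySem.Set.contains V node; exact absurd hc hv; rfl)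
      intro k hk
      rcases List.mem_cons.1 hk with rfl | hk'
      · exact (hInv k hvV (by simp)).2
      · exact ih V (fun w hw => hlU w (List.mem_cons_of_mem _ hw)) hInv hm h k hk' 

-- no cycle at all iff no key lies on a cycle
lemma noCyc_iff_keys (g : PySem.Dict String (List String)) :
    (¬ CycG g) ↔ ∀ k ∈ PySem.Dict.keys g, ¬ Relation.TransGen (EdgeG g) k k := by
  constructor
  · intro h k _ htg
    exact h ⟨k, htg⟩
  · rintro h ⟨u, htg⟩
    rcases Relation.TransGen.head'_iff.1 htg with ⟨b, hb, _⟩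
    exact h u (edge_src_key g u b hb) htg

lemma A_iff (grafo : List (String × List String)) :
    eh_grafo_aciclico_py grafo = true ↔ ¬ CycG (PySem.Dict.ofList grafo) := by
  set g := PySem.Dict.ofList grafo with hg
  set U := PySem.Set.ofList (grafo.map Prod.fst ++ (grafo.map Prod.snd).flatten) with hU
  set fuel := grafo.length + (grafo.map (fun p => p.2.length)).sum + 1 with hfuel
  have hU1 : ∀ u v, EdgeG g u v → v ∈ U := by
    intro u v h
    unfold EdgeG at h
    rw [PySem.Dict.getD_eq_get?_getD] at h
    cases hgq : PySem.Dict.get? g u with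
    | none => rw [hgq] at h; simp at h
    | some L =>
      rw [hgq] at h
      simp only [Option.getD_some] at h
      have hmem := get?_ofList_mem grafo u L hgq
      apply (PySem.Set.mem_ofList _ v).2
      apply List.mem_append_right
      exact List.mem_flatten.2 ⟨L, List.mem_map.2 ⟨(u, L), hmem, rfl⟩, h⟩
  have hkeysU : ∀ k ∈ PySem.Dict.keys g, k ∈ U := by
    intro k hk
    have hc : PySem.Dict.contains g k = true := (PySem.Dict.contains_iff_mem_keys g k).2 hk
    rw [PySem.Dict.contains_eq_isSome_get?] at hc
    cases hgq : PySem.Dict.get? g k with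
    | none => rw [hgq] at hc; simp at hc
    | some L =>
      have hmem := get?_ofList_mem grafo k L hgq
      apply (PySem.Set.mem_ofList _ k).2
      exact List.mem_append_left _ (List.mem_map.2 ⟨(k, L), hmem, rfl⟩)
  have hm0 : pvM U [] < fuel := by
    have h1 : pvM U [] = U.length := by
      unfold pvM
      have hall : ∀ x ∈ U, (!PySem.Set.contains ([] : List String) x) = true := by
        intro x _; rfl
      rw [List.filter_eq_self.2 hall]
    have h2 : U.length ≤ (grafo.map Prod.fst ++ (grafo.map Prod.snd).flatten).length :=
      PySem.Set.length_ofList_le _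
    rw [List.length_append, List.length_map, List.length_flatten, List.map_map] at h2
    have h3 : (grafo.map (List.length ∘ Prod.snd)).sum = (grafo.map (fun p => p.2.length)).sum := rfl
    omega
  have hrun : eh_grafo_aciclico_py grafo = pvOuterA g fuel (PySem.Dict.keys g) [] [] := rfl
  rw [hrun]
  constructor
  · intro htrue
    apply (noCyc_iff_keys g).2
    exact outer_complete g U hU1 fuel (PySem.Dict.keys g) [] hkeysU
      (fun u hu _ => absurd hu (by simp)) hm0 htrue
  · intro hnc
    cases hres : pvOuterA g fuel (PySem.Dict.keys g) [] [] with
    | true => rfl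
    | false => exact absurd (outer_sound g fuel (PySem.Dict.keys g) [] hres) hnc

-- ---- port B: the bounded closure computes reachability ----

lemma mem_stepB (g : PySem.Dict String (List String)) (r : PySem.Set String) (x : String) :
    x ∈ pvStepB g r ↔ x ∈ r ∨ ∃ u ∈ r, EdgeG g u x := by
  have aux : ∀ (l a : List String), (x ∈ List.foldl (fun acc u => PySem.Set.update acc (pvSucc g u)) a l ↔
      x ∈ a ∨ ∃ u ∈ l, x ∈ PySem.Dict.getD g u []) := by
    intro l
    induction l with
    | nil => intro a; simp
    | cons u rest ih =>
      intro a
      rw [List.foldl_cons, ih, PySem.Set.mem_update]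
      unfold pvSucc
      constructor
      · rintro ((h | h) | ⟨w, hw, hx⟩)
        · exact Or.inl h
        · exact Or.inr ⟨u, List.mem_cons_self, h⟩
        · exact Or.inr ⟨w, List.mem_cons_of_mem _ hw, hx⟩
      · rintro (h | ⟨w, hw, hx⟩)
        · exact Or.inl (Or.inl h)
        · rcases List.mem_cons.1 hw with rfl | hw'
          · exact Or.inl (Or.inr hx)
          · exact Or.inr ⟨w, hw', hx⟩
  exact aux r r

lemma stepB_prefix (g : PySem.Dict String (List String)) (r : PySem.Set String) :
    ∃ t, pvStepB g r = r ++ t := by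
  have aux : ∀ (l a : List String), ∃ t, List.foldl (fun acc u => PySem.Set.update acc (pvSucc g u)) a l = a ++ t := by
    intro l
    induction l with
    | nil => intro a; exact ⟨[], by simp⟩
    | cons u rest ih =>
      intro a
      rw [List.foldl_cons]
      obtain ⟨t, ht⟩ := ih (PySem.Set.update a (pvSucc g u))
      rw [ht, PySem.Set.update_eq_append_filter]
      exact ⟨_, by rw [List.append_assoc]⟩
  exact aux r r

lemma stepB_nodup (g : PySem.Dict String (List String)) (r : PySem.Set String) (h : r.Nodup) :
    (pvStepB g r).Nodup := by
  have aux : ∀ (l a : List String), a.Nodup → (List.foldl (fun acc u => PySem.Set.update acc (pvSucc g u)) a l).Nodup := by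
    intro l
    induction l with
    | nil => intro a h; exact h
    | cons u rest ih =>
      intro a ha
      rw [List.foldl_cons]
      exact ih _ (PySem.Set.nodup_update a _ ha)
  exact aux r r h

lemma closeB_succ' (g : PySem.Dict String (List String)) (n : Nat) (r : PySem.Set String) :
    pvCloseB g (n+1) r = pvStepB g (pvCloseB g n r) := by
  induction n generalizing r with
  | zero => rfl
  | succ n ih => rw [pvCloseB, ih, pvCloseB]

lemma closeB_sub (g : PySem.Dict String (List String)) (n : Nat) (r : PySem.Set String) :
    ∀ x ∈ r, x ∈ pvCloseB g n r := by
  induction n generalizing r with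
  | zero => intro x hx; exact hx
  | succ n ih =>
    intro x hx
    rw [pvCloseB]
    exact ih _ x ((mem_stepB g r x).2 (Or.inl hx))

lemma closeB_nodup (g : PySem.Dict String (List String)) (n : Nat) (r : PySem.Set String)
    (h : r.Nodup) : (pvCloseB g n r).Nodup := by
  induction n generalizing r with
  | zero => exact h
  | succ n ih =>
    rw [pvCloseB]
    exact ih _ (stepB_nodup g r h)

lemma closeB_sound (g : PySem.Dict String (List String)) (n : Nat) (r : PySem.Set String)
    (x : String) (h : x ∈ pvCloseB g n r) : ∃ y ∈ r, Relation.ReflTransGen (EdgeG g) y x := by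
  induction n generalizing r with
  | zero => exact ⟨x, h, Relation.ReflTransGen.refl⟩
  | succ n ih =>
    rw [pvCloseB] at h
    obtain ⟨y, hy, hrtg⟩ := ih _ h
    rcases (mem_stepB g r y).1 hy with h1 | ⟨u, hu, hedge⟩
    · exact ⟨y, h1, hrtg⟩
    · exact ⟨u, hu, Relation.ReflTransGen.head hedge hrtg⟩

-- if the closure still grows at stage i+1 it has swallowed i+1 distinct keys by stage i
lemma closeB_growth (g : PySem.Dict String (List String)) (r0 : PySem.Set String) (h0 : r0.Nodup) :
    ∀ i, pvCloseB g (i+1) r0 ≠ pvCloseB g i r0 →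
    ∃ ks : List String, ks.Nodup ∧ ks.length = i+1 ∧
      ∀ k ∈ ks, k ∈ PySem.Dict.keys g ∧ k ∈ pvCloseB g i r0 := by
  have closeB_new : ∀ i, pvCloseB g (i+1) r0 ≠ pvCloseB g i r0 →
      ∃ x, x ∈ pvStepB g (pvCloseB g i r0) ∧ x ∉ pvCloseB g i r0 := by
    intro i h
    obtain ⟨t, ht⟩ := stepB_prefix g (pvCloseB g i r0)
    cases t with
    | nil => exact absurd (by rw [closeB_succ', ht, List.append_nil]) h
    | cons x t' =>
      have hnd := stepB_nodup g _ (closeB_nodup g i r0 h0)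
      rw [ht] at hnd
      have hdisj := List.disjoint_of_nodup_append hnd
      exact ⟨x, by rw [ht]; exact List.mem_append_right _ List.mem_cons_self,
             fun hc => hdisj hc List.mem_cons_self⟩
  intro i
  induction i with
  | zero =>
    intro h
    obtain ⟨x, hx, hnx⟩ := closeB_new 0 h
    rcases (mem_stepB g _ x).1 hx with h1 | ⟨u, hu, hedge⟩
    · exact absurd h1 hnx
    · refine ⟨[u], by simp, rfl, ?_⟩
      intro k hk
      rcases List.mem_cons.1 hk with rfl | hk'
      · exact ⟨edge_src_key g k x hedge, hu⟩
      · exact absurd hk' (by simp)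
  | succ i ih =>
    intro h
    have hprev : pvCloseB g (i+1) r0 ≠ pvCloseB g i r0 := by
      intro he
      apply h
      rw [closeB_succ' g (i+1), he, ← closeB_succ' g i]
      exact he
    obtain ⟨ks, hnd, hlen, hks⟩ := ih hprev
    obtain ⟨x, hx, hnx⟩ := closeB_new (i+1) h
    rcases (mem_stepB g _ x).1 hx with h1 | ⟨u, hu, hedge⟩
    · exact absurd h1 hnx
    · have hu_not : u ∉ pvCloseB g i r0 := by
        intro hc
        apply hnx
        rw [closeB_succ']
        exact (mem_stepB g _ x).2 (Or.inr ⟨u, hc, hedge⟩)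
      have hsub : ∀ y ∈ pvCloseB g i r0, y ∈ pvCloseB g (i+1) r0 := by
        intro y hy
        rw [closeB_succ']
        exact (mem_stepB g _ y).2 (Or.inl hy)
      refine ⟨u :: ks, List.nodup_cons.2 ⟨fun hc => hu_not (hks u hc).2, hnd⟩, by simp [hlen], ?_⟩
      intro k hk
      rcases List.mem_cons.1 hk with rfl | hk'
      · exact ⟨edge_src_key g k x hedge, hu⟩
      · exact ⟨(hks k hk').1, hsub k (hks k hk').2⟩

lemma closeB_closed (g : PySem.Dict String (List String)) (hnd : (PySem.Dict.keys g).Nodup)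
    (r0 : PySem.Set String) (h0 : r0.Nodup) :
    pvStepB g (pvCloseB g (PySem.Dict.keys g).length r0) = pvCloseB g (PySem.Dict.keys g).length r0 := by
  by_contra h
  have hne : pvCloseB g ((PySem.Dict.keys g).length + 1) r0 ≠ pvCloseB g (PySem.Dict.keys g).length r0 := by
    rw [closeB_succ']
    exact h
  obtain ⟨ks, hnd2, hlen, hks⟩ := closeB_growth g r0 h0 (PySem.Dict.keys g).length hne
  have h1 : ks.toFinset.card = ks.length := List.toFinset_card_of_nodup hnd2
  have h2 : (PySem.Dict.keys g).toFinset.card = (PySem.Dict.keys g).length :=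
    List.toFinset_card_of_nodup hnd
  have hsub : ks.toFinset ⊆ (PySem.Dict.keys g).toFinset :=
    fun k hk => List.mem_toFinset.2 ((hks k (List.mem_toFinset.1 hk)).1)
  have hcard := Finset.card_le_card hsub
  omega

lemma closeB_complete (g : PySem.Dict String (List String)) (hnd : (PySem.Dict.keys g).Nodup)
    (r0 : PySem.Set String) (h0 : r0.Nodup) (y x : String) (hy : y ∈ r0)
    (h : Relation.ReflTransGen (EdgeG g) y x) : x ∈ pvCloseB g (PySem.Dict.keys g).length r0 := by
  induction h with
  | refl => exact closeB_sub g _ r0 y hy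
  | @tail b c hab hbc ih =>
    have hm : c ∈ pvStepB g (pvCloseB g (PySem.Dict.keys g).length r0) :=
      (mem_stepB g _ c).2 (Or.inr ⟨b, ih, hbc⟩)
    rw [closeB_closed g hnd r0 h0] at hm
    exact hm

lemma B_iff (grafo : List (String × List String)) :
    eh_grafo_aciclico_py_alt grafo = true ↔ ¬ CycG (PySem.Dict.ofList grafo) := by
  set g := PySem.Dict.ofList grafo with hgdef
  have hnd : (PySem.Dict.keys g).Nodup := PySem.Dict.nodup_keys_ofList grafo
  have hcont : ∀ k, (PySem.Set.contains (pvCloseB g (PySem.Dict.keys g).length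
      (PySem.Set.ofList (pvSucc g k))) k = true) ↔ Relation.TransGen (EdgeG g) k k := by
    intro k
    constructor
    · intro h
      obtain ⟨y, hy, hrtg⟩ := closeB_sound g _ _ k ((PySem.Set.contains_iff _ k).1 h)
      exact Relation.TransGen.head' ((PySem.Set.mem_ofList _ y).1 hy) hrtg
    · intro h
      rcases Relation.TransGen.head'_iff.1 h with ⟨b, hb, hrtg⟩
      apply (PySem.Set.contains_iff _ k).2
      exact closeB_complete g hnd _ (PySem.Set.nodup_ofList _) b k
        ((PySem.Set.mem_ofList _ b).2 hb) hrtg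
  have hloop : ∀ l, (pvKeysLoopB g l = true ↔ ∀ k ∈ l, ¬ Relation.TransGen (EdgeG g) k k) := by
    intro l
    induction l with
    | nil => simp [pvKeysLoopB]
    | cons k rest ih =>
      rw [pvKeysLoopB]
      by_cases hc : PySem.Set.contains (pvCloseB g (PySem.Dict.keys g).length
          (PySem.Set.ofList (pvSucc g k))) k = true
      · rw [if_pos hc]
        exact ⟨fun h => absurd h (by simp),
               fun hall => absurd ((hcont k).1 hc) (hall k List.mem_cons_self)⟩
      · rw [if_neg hc]
        rw [ih]
        constructor
        · intro hall k' hk'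
          rcases List.mem_cons.1 hk' with rfl | hk2
          · exact fun htg => hc ((hcont k').2 htg)
          · exact hall k' hk2
        · exact fun hall k' hk2 => hall k' (List.mem_cons_of_mem _ hk2)
  have hrun : eh_grafo_aciclico_py_alt grafo = pvKeysLoopB g (PySem.Dict.keys g) := rfl
  rw [hrun, hloop]
  exact (noCyc_iff_keys g).symm

-- ===== VERDICT (by name: the statement is the Claim_ definition above) =====
theorem eh_grafo_aciclico_py_spec : Claim_equal_eh_grafo_aciclico_py := by
  intro grafo _
  unfold Spec_eh_grafo_aciclico_py
  have hA := A_iff grafo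
  have hB := B_iff grafo
  cases ha : eh_grafo_aciclico_py grafo <;> cases hb : eh_grafo_aciclico_py_alt grafo <;>
    simp_all
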